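-- pv_equiv track=rewrite | github.com/RonsDad/ron-ai | src/browser/enhanced_browser_manager.py | _parse_voice_command
-- ===== SOURCE A (Python) =====
-- def _parse_voice_command(command_text: str) -> str:
--     """
--     Parse voice command to determine intent
--
--     Args:
--         command_text: Command text
--
--     Returns:
--         Command intent
--     """
--     # Simplified intent parsing - would use NLP in real implementation
--     command_lower = command_text.lower()
--
--     if any(word in command_lower for word in ['navigate', 'go to', 'visit']):
--         return 'navigate'
--     elif any(word in command_lower for word in ['click', 'press', 'tap']):
--         return 'click'
--     elif any(word in command_lower for word in ['type', 'enter', 'input']):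
--         return 'type'
--     elif any(word in command_lower for word in ['scroll', 'move']):
--         return 'scroll'
--     elif any(word in command_lower for word in ['take control', 'human control']):
--         return 'human_control'
--     else:
--         return 'unknown'
-- ===== SOURCE B (Python) =====
-- # Single pass over a flat keyword->intent map, keeping the best (lowest-priority-rank)
-- # matching intent in an accumulator; no early return, no grouped elif scan.
-- KEYWORD_INTENT = {
--     'navigate': 'navigate', 'go to': 'navigate', 'visit': 'navigate',
--     'click': 'click', 'press': 'click', 'tap': 'click',
--     'type': 'type', 'enter': 'type', 'input': 'type',
--     'scroll': 'scroll', 'move': 'scroll',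
--     'take control': 'human_control', 'human control': 'human_control',
-- }
-- PRIORITY = {'navigate': 0, 'click': 1, 'type': 2, 'scroll': 3, 'human_control': 4}
--
--
-- def _parse_voice_command(command_text: str) -> str:
--     text = command_text.lower()
--     best = None
--     for keyword, intent in KEYWORD_INTENT.items():
--         if keyword in text and (best is None or PRIORITY[intent] < PRIORITY[best]):
--             best = intent
--     return best if best is not None else 'unknown'
-- ===== Notes on version B (the rewrite author's own statement) =====
-- stated objective: alternative
-- what changed: Replaced the ordered elif groups with early return by a single flat pass over a keyword-to-intent map that keeps the minimum-priority matching intent in an accumulator (best-match selection instead of first-group-wins control flow).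
import Mathlib
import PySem

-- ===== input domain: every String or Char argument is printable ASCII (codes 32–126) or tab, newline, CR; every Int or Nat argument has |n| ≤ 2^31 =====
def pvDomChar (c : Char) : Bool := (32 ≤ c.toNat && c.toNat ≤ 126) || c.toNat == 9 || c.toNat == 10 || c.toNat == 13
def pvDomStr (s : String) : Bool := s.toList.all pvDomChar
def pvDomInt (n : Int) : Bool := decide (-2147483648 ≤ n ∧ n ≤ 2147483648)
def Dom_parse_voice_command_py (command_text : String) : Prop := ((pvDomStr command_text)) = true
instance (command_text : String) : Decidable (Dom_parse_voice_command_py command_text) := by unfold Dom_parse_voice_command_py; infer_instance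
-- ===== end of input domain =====

-- B selects the best (minimum-priority) matching intent in one flat accumulator pass over a keyword->intent map, instead of A's ordered elif groups with early return (alternative decomposition; same behaviour).


-- ===== PORT A =====
def parse_voice_command_py (command_text : String) : String :=
  let command_lower := PySem.Str.lower command_text
  if ["navigate", "go to", "visit"].any (fun word => PySem.Str.isIn word command_lower) then
    "navigate"
  else if ["click", "press", "tap"].any (fun word => PySem.Str.isIn word command_lower) then
    "click"
  else if ["type", "enter", "input"].any (fun word => PySem.Str.isIn word command_lower) then
    "type"
  else if ["scroll", "move"].any (fun word => PySem.Str.isIn word command_lower) then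
    "scroll"
  else if ["take control", "human control"].any (fun word => PySem.Str.isIn word command_lower) then
    "human_control"
  else
    "unknown"

-- ===== PORT B =====
-- flat keyword -> intent map (Python dict KEYWORD_INTENT, items in insertion order)
def pvKeywordIntent : List (String × String) :=
  [("navigate", "navigate"), ("go to", "navigate"), ("visit", "navigate"),
   ("click", "click"), ("press", "click"), ("tap", "click"),
   ("type", "type"), ("enter", "type"), ("input", "type"),
   ("scroll", "scroll"), ("move", "scroll"),
   ("take control", "human_control"), ("human control", "human_control")]

-- Python dict PRIORITY (every intent stored in KEYWORD_INTENT is a key, so the lookup never raises)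
def pvPriorityDict : PySem.Dict String Int :=
  PySem.Dict.ofList [("navigate", 0), ("click", 1), ("type", 2), ("scroll", 3), ("human_control", 4)]

def parse_voice_command_py_alt (command_text : String) : String :=
  let text := PySem.Str.lower command_text
  let best := pvKeywordIntent.foldl
    (fun (best : Option String) (p : String × String) =>
      if PySem.Str.isIn p.1 text &&
         (match best with
          | none => true
          | some b => decide (pvPriorityDict.getD p.2 0 < pvPriorityDict.getD b 0)) then
        some p.2
      else best) none
  match best with
  | some b => b
  | none => "unknown"

-- ===== PRECONDITION & SPEC =====
def Spec_parse_voice_command_py (command_text : String) (out : String) : Prop := out = parse_voice_command_py_alt command_text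
instance (command_text : String) (out : String) : Decidable (Spec_parse_voice_command_py command_text out) := by unfold Spec_parse_voice_command_py; infer_instance

-- ===== CLAIM (what is proved, stated in full; the proofs are below) =====
def Claim_equal_parse_voice_command_py : Prop := ∀ (command_text : String), Dom_parse_voice_command_py command_text → Spec_parse_voice_command_py command_text (parse_voice_command_py command_text)

-- ===== LEMMAS AND PROOFS =====

-- Both ports depend on the lowered text only through the 13 substring tests; abstract
-- those as Booleans and check all 2^13 cases by kernel evaluation.
set_option maxHeartbeats 4000000 in
theorem pv_bool_core (b1 b2 b3 b4 b5 b6 b7 b8 b9 b10 b11 b12 b13 : Bool) :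
    (if b1 || (b2 || (b3 || false)) then "navigate"
     else if b4 || (b5 || (b6 || false)) then "click"
     else if b7 || (b8 || (b9 || false)) then "type"
     else if b10 || (b11 || false) then "scroll"
     else if b12 || (b13 || false) then "human_control"
     else "unknown") =
    (match
        [(b1, "navigate"), (b2, "navigate"), (b3, "navigate"),
         (b4, "click"), (b5, "click"), (b6, "click"),
         (b7, "type"), (b8, "type"), (b9, "type"),
         (b10, "scroll"), (b11, "scroll"),
         (b12, "human_control"), (b13, "human_control")].foldl
          (fun (best : Option String) (p : Bool × String) =>
            if p.1 &&
               (match best with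
                | none => true
                | some b => decide (pvPriorityDict.getD p.2 0 < pvPriorityDict.getD b 0)) then
              some p.2
            else best) none with
      | some b => b
      | none => "unknown") := by
  revert b1 b2 b3 b4 b5 b6 b7 b8 b9 b10 b11 b12 b13
  decide

-- ===== VERDICT (by name: the statement is the Claim_ definition above) =====
set_option maxHeartbeats 4000000 in
theorem parse_voice_command_py_spec : Claim_equal_parse_voice_command_py := by
  intro command_text _
  unfold Spec_parse_voice_command_py parse_voice_command_py parse_voice_command_py_alt pvKeywordIntent
  have h := pv_bool_core
    (PySem.Str.isIn "navigate" (PySem.Str.lower command_text))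
    (PySem.Str.isIn "go to" (PySem.Str.lower command_text))
    (PySem.Str.isIn "visit" (PySem.Str.lower command_text))
    (PySem.Str.isIn "click" (PySem.Str.lower command_text))
    (PySem.Str.isIn "press" (PySem.Str.lower command_text))
    (PySem.Str.isIn "tap" (PySem.Str.lower command_text))
    (PySem.Str.isIn "type" (PySem.Str.lower command_text))
    (PySem.Str.isIn "enter" (PySem.Str.lower command_text))
    (PySem.Str.isIn "input" (PySem.Str.lower command_text))
    (PySem.Str.isIn "scroll" (PySem.Str.lower command_text))
    (PySem.Str.isIn "move" (PySem.Str.lower command_text))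
    (PySem.Str.isIn "take control" (PySem.Str.lower command_text))
    (PySem.Str.isIn "human control" (PySem.Str.lower command_text))
  exact h
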